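-- pv_equiv track=rewrite | github.com/sebnson/ps | programmers/lv0/181854.py | solution
-- ===== SOURCE A (Python) =====
-- def solution(arr, n):
--     answer = []
--     if len(arr)%2 == 1: # 홀수
--         for i in range(len(arr)):
--             if i%2==1:
--                 answer.append(arr[i])
--             else:
--                 answer.append(arr[i]+n)
--     else: # 짝수
--         for i in range(len(arr)):
--             if i%2==1:
--                 answer.append(arr[i]+n)
--             else:
--                 answer.append(arr[i])
--     return answer
-- ===== SOURCE B (Python) =====
-- def solution(arr, n):
--     answer = list(arr)
--     for i in range((len(answer) + 1) % 2, len(answer), 2):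
--         answer[i] += n
--     return answer
-- ===== Notes on version B (the rewrite author's own statement) =====
-- stated objective: simpler
-- what changed: Replaces A's length-parity branch with two per-element-parity loops by a copy of the input and a single strided loop that adds n only at the affected indices.
import Mathlib
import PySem

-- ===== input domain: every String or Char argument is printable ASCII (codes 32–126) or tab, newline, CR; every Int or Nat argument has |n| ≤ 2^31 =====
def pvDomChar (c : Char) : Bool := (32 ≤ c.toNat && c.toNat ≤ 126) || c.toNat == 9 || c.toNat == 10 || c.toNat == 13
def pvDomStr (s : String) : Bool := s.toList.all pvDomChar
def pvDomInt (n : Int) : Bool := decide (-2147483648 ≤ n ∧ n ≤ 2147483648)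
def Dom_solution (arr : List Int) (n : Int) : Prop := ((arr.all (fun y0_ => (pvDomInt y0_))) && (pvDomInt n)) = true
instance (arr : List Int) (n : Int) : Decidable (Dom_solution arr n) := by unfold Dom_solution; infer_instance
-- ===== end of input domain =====

-- B replaces A's length-parity branch with two per-element-parity loops by a copy of
-- the input plus one strided in-place loop over the indices that receive +n (simpler
-- decomposition, same O(n) cost). Neither program mutates its argument.

-- ===== PORT A =====
def solution (arr : List Int) (n : Int) : List Int :=
  let answer : List Int := []
  if PySem.Int.mod (arr.length : Int) 2 == 1 then
    (PySem.List.pyRange 0 (arr.length : Int) 1).foldl (fun answer i =>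
      if PySem.Int.mod i 2 == 1 then answer ++ [PySem.List.pyGetD arr i 0]
      else answer ++ [PySem.List.pyGetD arr i 0 + n]) answer
  else
    (PySem.List.pyRange 0 (arr.length : Int) 1).foldl (fun answer i =>
      if PySem.Int.mod i 2 == 1 then answer ++ [PySem.List.pyGetD arr i 0 + n]
      else answer ++ [PySem.List.pyGetD arr i 0]) answer

-- ===== PORT B =====
def solution_alt (arr : List Int) (n : Int) : List Int :=
  let answer : List Int := arr
  (PySem.List.pyRange (PySem.Int.mod ((answer.length : Int) + 1) 2) (answer.length : Int) 2).foldl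
    (fun answer i => PySem.List.pySetD answer i (PySem.List.pyGetD answer i 0 + n)) answer

-- ===== PRECONDITION & SPEC =====
def Spec_solution (arr : List Int) (n : Int) (out : List Int) : Prop := out = solution_alt arr n
instance (arr : List Int) (n : Int) (out : List Int) : Decidable (Spec_solution arr n out) := by unfold Spec_solution; infer_instance

-- ===== CLAIM (what is proved, stated in full; the proofs are below) =====
def Claim_equal_solution : Prop := ∀ (arr : List Int) (n : Int), Dom_solution arr n → Spec_solution arr n (solution arr n)

-- ===== LEMMAS AND PROOFS =====

-- common normal form: add n exactly at indices j with j % 2 = (len+1) % 2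
def pvTarget (arr : List Int) (n : Int) : List Int :=
  arr.mapIdx (fun j x => if j % 2 = (arr.length + 1) % 2 then x + n else x)

theorem pv_foldl_set (n : Int) (idxs : List Int) (l : List Int)
    (hb : ∀ i ∈ idxs, 0 ≤ i ∧ i < (l.length : Int)) (hnd : idxs.Nodup) :
    idxs.foldl (fun a i => PySem.List.pySetD a i (PySem.List.pyGetD a i 0 + n)) l
      = l.mapIdx (fun j x => if (j : Int) ∈ idxs then x + n else x) := by
  induction idxs generalizing l with
  | nil => apply List.ext_getElem <;> simp
  | cons i rest ih =>
      obtain ⟨hi0, hil⟩ := hb i (by simp)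
      have hitn : i.toNat < l.length := by omega
      have hstep : PySem.List.pySetD l i (PySem.List.pyGetD l i 0 + n)
          = l.set i.toNat (l[i.toNat] + n) := by
        rw [PySem.List.pySetD_of_nonneg l _ hi0, PySem.List.pyGetD_eq_getElem l 0 hi0 hil]
      have hirest : i ∉ rest := (List.nodup_cons.mp hnd).1
      rw [List.foldl_cons, hstep, ih _ (by
        intro j hj
        have := hb j (List.mem_cons_of_mem _ hj)
        simpa using this) (List.nodup_cons.mp hnd).2]
      apply List.ext_getElem
      · simp
      · intro j hj₁ hj₂
        have hjl : j < l.length := by simpa using hj₂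
        simp only [List.getElem_mapIdx, List.getElem_set, List.mem_cons]
        by_cases hji : j = i.toNat
        · subst hji
          have hji' : ((i.toNat : Nat) : Int) = i := by omega
          have hnr : ((i.toNat : Nat) : Int) ∉ rest := by rw [hji']; exact hirest
          rw [if_neg hnr, if_pos (Or.inl hji'), if_pos rfl]
        · have hji' : (j : Int) ≠ i := by omega
          have h2 : i.toNat ≠ j := fun h => hji h.symm
          by_cases hr : (j : Int) ∈ rest <;> simp [hr, hji', h2]

theorem pv_alt_eq_target (arr : List Int) (n : Int) : solution_alt arr n = pvTarget arr n := by
  unfold solution_alt pvTarget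
  set L := arr.length with hL
  set s : Int := PySem.Int.mod ((L : Int) + 1) 2 with hs
  have hsval : s = ((L + 1) % 2 : Nat) := by
    rw [hs]; exact_mod_cast PySem.Int.mod_natCast (L + 1) 2
  have hs01 : s = 0 ∨ s = 1 := by omega
  have hnd : (PySem.List.pyRange s (L : Int) 2).Nodup := by
    rw [PySem.List.pyRange_of_pos s (L : Int) (by norm_num)]
    exact (List.nodup_range).map (fun a b h => by omega)
  rw [pv_foldl_set n _ arr (by
      intro i hi
      have := (PySem.List.mem_pyRange_iff_of_pos (by norm_num) i).mp hi
      omega) hnd]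
  apply List.ext_getElem
  · simp
  · intro j hj₁ hj₂
    have hjl : j < arr.length := by simpa using hj₁
    simp only [List.getElem_mapIdx]
    have hmem : (j : Int) ∈ PySem.List.pyRange s (L : Int) 2 ↔ j % 2 = (L + 1) % 2 := by
      rw [PySem.List.mem_pyRange_iff_of_pos (by norm_num)]
      constructor
      · intro ⟨h1, h2, h3⟩; omega
      · intro h; refine ⟨by omega, by omega, by omega⟩
    by_cases hc : j % 2 = (arr.length + 1) % 2
    · rw [if_pos (hmem.mpr hc), if_pos hc]
    · rw [if_neg (fun m => hc (hmem.mp m)), if_neg hc]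

theorem pv_a_eq_target (arr : List Int) (n : Int) : solution arr n = pvTarget arr n := by
  unfold solution pvTarget
  have hmodL : PySem.Int.mod (arr.length : Int) 2 = ((arr.length % 2 : Nat) : Int) :=
    PySem.Int.mod_natCast arr.length 2
  have hbody : ∀ (f g : Int → Int),
      (fun (answer : List Int) (i : Int) =>
        if PySem.Int.mod i 2 == 1 then answer ++ [f i] else answer ++ [g i])
      = fun answer i => answer ++ [if PySem.Int.mod i 2 == 1 then f i else g i] := by
    intro f g; funext a i; split <;> rfl
  have hfin : ∀ (F : Int → Int), (∀ k : Nat, k < arr.length → F (k : Int)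
        = if k % 2 = (arr.length + 1) % 2 then arr[k]! + n else arr[k]!) →
      (PySem.List.pyRange 0 (arr.length : Int) 1).foldl
        (fun answer i => answer ++ [F i]) []
      = arr.mapIdx (fun j x => if j % 2 = (arr.length + 1) % 2 then x + n else x) := by
    intro F hF
    rw [PySem.List.foldl_append_singleton_eq_map]
    apply List.ext_getElem
    · simp [PySem.List.length_pyRange_one]
    · intro j hj₁ hj₂
      have hjl : j < arr.length := by
        simp [PySem.List.length_pyRange_one] at hj₁
        omega
      simp only [List.nil_append, List.getElem_map, PySem.List.getElem_pyRange_one,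
        List.getElem_mapIdx, zero_add]
      rw [hF j hjl]
      have : arr[j]! = arr[j] := getElem!_pos arr j hjl
      rw [this]
  split
  · next hodd =>
      have hlo : arr.length % 2 = 1 := by
        rw [hmodL] at hodd
        have := beq_iff_eq.mp hodd
        omega
      rw [hbody]
      apply hfin
      intro k hk
      have hmk : PySem.Int.mod (k : Int) 2 = ((k % 2 : Nat) : Int) :=
        PySem.Int.mod_natCast k 2
      have hget : PySem.List.pyGetD arr (k : Int) 0 = arr[k]! := by
        rw [PySem.List.pyGetD_eq_getElem arr 0 (by omega) (by exact_mod_cast hk)]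
        simp [getElem!_pos, hk]
      by_cases hp : k % 2 = 1
      · have h1 : (PySem.Int.mod (k : Int) 2 == 1) = true := by
          rw [hmk, hp]; rfl
        rw [if_pos h1, if_neg (by omega), hget]
      · have h1 : (PySem.Int.mod (k : Int) 2 == 1) = false := by
          rw [hmk]; simp; omega
        rw [h1]
        simp only [Bool.false_eq_true, if_false]
        rw [if_pos (by omega), hget]
  · next heven =>
      have hlo : arr.length % 2 = 0 := by
        rw [hmodL] at heven
        have : ¬ ((arr.length % 2 : Nat) : Int) = 1 := fun h => heven (beq_iff_eq.mpr h)
        omega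
      rw [hbody]
      apply hfin
      intro k hk
      have hmk : PySem.Int.mod (k : Int) 2 = ((k % 2 : Nat) : Int) :=
        PySem.Int.mod_natCast k 2
      have hget : PySem.List.pyGetD arr (k : Int) 0 = arr[k]! := by
        rw [PySem.List.pyGetD_eq_getElem arr 0 (by omega) (by exact_mod_cast hk)]
        simp [getElem!_pos, hk]
      by_cases hp : k % 2 = 1
      · have h1 : (PySem.Int.mod (k : Int) 2 == 1) = true := by
          rw [hmk, hp]; rfl
        rw [if_pos h1, if_pos (by omega), hget]
      · have h1 : (PySem.Int.mod (k : Int) 2 == 1) = false := by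
          rw [hmk]; simp; omega
        rw [h1]
        simp only [Bool.false_eq_true, if_false]
        rw [if_neg (by omega), hget]

-- ===== VERDICT (by name: the statement is the Claim_ definition above) =====
theorem solution_spec : Claim_equal_solution := by
  intro arr n _
  unfold Spec_solution
  rw [pv_a_eq_target, pv_alt_eq_target]
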